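-- pv_equiv track=rewrite | github.com/KimGJHC/Data-Structure-Algorithem-learning | DynamicProgramming/RegexMatching.py | isMatch_v1
-- ===== SOURCE A (Python) =====
-- def isMatch_v1(s, p):
--     # do with recursion
--     if not p:
--          return not s
--     match = s and p[0] in ['.', s[0]]
--     if len(p) >= 2 and p[1] == '*':
--         return isMatch_v1(s, p[2:]) or (match and isMatch_v1(s[1:], p))
--     else:
--         return match and isMatch_v1(s[1:], p[1:])
-- ===== SOURCE B (Python) =====
-- def isMatch_v1(s, p):
--     # top-down DP: memoize the match question over index pairs (i, j), visiting
--     # only reachable states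
--     memo = {}
--     def go(i, j):
--         key = (i, j)
--         if key in memo:
--             return memo[key]
--         if j == len(p):
--             res = i == len(s)
--         else:
--             first = i < len(s) and p[j] in (s[i], '.')
--             if j + 1 < len(p) and p[j + 1] == '*':
--                 res = go(i, j + 2) or (first and go(i + 1, j))
--             else:
--                 res = first and go(i + 1, j + 1)
--         memo[key] = res
--         return res
--     return go(0, 0)
-- ===== Notes on version B (the rewrite author's own statement) =====
-- stated objective: faster
-- what changed: Replaced A's exponential branching recursion over string suffixes by memoized recursion over index pairs (i,j), so each state is solved once (O(n*m) states).
-- outside the precondition, e.g. on isMatch_v1('a', 'ab'): A returns '', B returns False; on isMatch_v1('', 'b'): A returns '', B returns False; on isMatch_v1('aa', 'a*b'): A returns '', B returns False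
import Mathlib
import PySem

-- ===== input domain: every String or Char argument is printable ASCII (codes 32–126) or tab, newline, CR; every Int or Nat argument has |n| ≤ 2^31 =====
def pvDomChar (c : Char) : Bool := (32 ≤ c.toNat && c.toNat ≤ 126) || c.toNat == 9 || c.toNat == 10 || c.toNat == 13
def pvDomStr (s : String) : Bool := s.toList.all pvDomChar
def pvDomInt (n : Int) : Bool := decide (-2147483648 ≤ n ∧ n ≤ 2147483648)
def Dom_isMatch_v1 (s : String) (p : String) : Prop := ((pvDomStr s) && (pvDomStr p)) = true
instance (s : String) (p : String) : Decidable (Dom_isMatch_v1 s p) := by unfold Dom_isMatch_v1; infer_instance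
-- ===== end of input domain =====

-- B replaces A's exponential branching recursion by memoized recursion over index pairs (objective: faster, asymptotic).

-- ===== PORT A =====
-- A's recursion on the two strings; Python's short-circuit `s and p[0] in ['.', s[0]]`
-- is transcribed by matching on s (when s is empty the conjunction is falsy without
-- reading s[0]); A's falsy return value '' maps to false under the Bool return type
-- (inputs where Python A returns the non-bool '' are excluded exactly by Pre_ below).
def pvAMatch : List Char → List Char → Bool
  | s, [] => s.isEmpty
  | s, c :: rest =>
    if _h : rest.head? = some '*' then
      -- len(p) >= 2 and p[1] == '*' : return isMatch(s, p[2:]) or (match and isMatch(s[1:], p))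
      pvAMatch s rest.tail ||
        (match s with
         | [] => false
         | a :: s' => (c == '.' || c == a) && pvAMatch s' (c :: rest))
    else
      -- return match and isMatch(s[1:], p[1:])
      match s with
      | [] => false
      | a :: s' => (c == '.' || c == a) && pvAMatch s' rest
termination_by s p => s.length + p.length
decreasing_by
  all_goals (rcases rest with _ | ⟨d, r⟩ <;> simp_all <;> omega)

def isMatch_v1 (s : String) (p : String) : Bool := pvAMatch s.toList p.toList

-- ===== PORT B =====
-- B's memoized recursion over index pairs; the Python closure mutates a dict, so the
-- port threads the memo dictionary through explicitly (same keys, same insertions).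
def pvGo (sc pc : List Char) :
    Nat → PySem.Dict (Nat × Nat) Bool → Nat → Nat → PySem.Dict (Nat × Nat) Bool × Bool
  | 0, memo, _, _ => (memo, false)   -- recursion-depth guard only, for structural recursion;
                                     -- never reached: the start value exceeds the (i, j) measure
  | depth + 1, memo, i, j =>
    match memo.get? (i, j) with
    | some b => (memo, b)                                  -- if key in memo: return memo[key]
    | none =>
      let res :=
        if j = pc.length then (memo, decide (i = sc.length))      -- res = i == len(s)
        else
          -- first = i < len(s) and p[j] in (s[i], '.')
          let first := decide (i < sc.length) && (pc.getD j ' ' == sc.getD i ' ' || pc.getD j ' ' == '.')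
          if j + 1 < pc.length ∧ pc.getD (j + 1) ' ' = '*' then
            -- res = go(i, j + 2) or (first and go(i + 1, j)), short-circuit
            let r1 := pvGo sc pc depth memo i (j + 2)
            if r1.2 then (r1.1, true)
            else if first then pvGo sc pc depth r1.1 (i + 1) j
            else (r1.1, false)
          else
            -- res = first and go(i + 1, j + 1), short-circuit
            if first then pvGo sc pc depth memo (i + 1) (j + 1)
            else (memo, false)
      (res.1.insert (i, j) res.2, res.2)                   -- memo[key] = res; return res

def isMatch_v1_alt (s : String) (p : String) : Bool :=
  (pvGo s.toList p.toList (s.toList.length + p.toList.length + 1) PySem.Dict.empty 0 0).2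

-- ===== PRECONDITION & SPEC =====
-- index of the first pattern position followed by '*' (pattern length if none)
def pvStarIdx : List Char → Nat
  | [] => 0
  | [_] => 1
  | _ :: d :: r => if d = '*' then 0 else 1 + pvStarIdx (d :: r)

def pvMt (c a : Char) : Bool := c == '.' || c == a

-- position j of pattern q carries a '*' on the next position
def pvStarAt (q : List Char) (j : Nat) : Bool := decide (j + 1 < q.length) && (q.getD (j + 1) ' ' == '*')

-- skipping starred elements from position j: the positions j, j+2, … reachable without consuming a character
def pvCloseOne (q : List Char) (j : Nat) : List Nat :=
  if h : j + 1 < q.length ∧ q.getD (j + 1) ' ' = '*' then j :: pvCloseOne q (j + 2) else [j]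
termination_by q.length - j
decreasing_by omega

-- does string s match pattern q (with '.'/'*' semantics)? decided by stepping the set of live pattern positions
-- through s (a position-set NFA run), independent of either port's recursion
def pvTMatch (s q : List Char) : Bool :=
  (s.foldl
    (fun st a =>
      (st.flatMap fun j =>
        if j < q.length ∧ pvMt (q.getD j ' ') a = true then
          pvCloseOne q (if pvStarAt q j then j else j + 1)
        else []).dedup)
    (pvCloseOne q 0)).contains q.length

-- does Python A return the falsy non-bool '' (empty string) on (s, p)? That happens exactly when A's single
-- failing search path runs s empty with pattern left over: either s ends inside p's leading literal segment
-- with every character matching, or that segment matches, the first starred element matches all remaining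
-- characters of s, and no suffix of s from the star on matches the pattern after the star pair.
def pvRetEmpty (sc pc : List Char) : Bool :=
  let k := pvStarIdx pc
  let n := sc.length
  (decide (n < k) && (List.range n).all (fun i => pvMt (pc.getD i ' ') (sc.getD i ' ')))
  || (decide (k < pc.length) && decide (k ≤ n)
      && (List.range k).all (fun i => pvMt (pc.getD i ' ') (sc.getD i ' '))
      && (List.range (n - k)).all (fun d => pvMt (pc.getD k ' ') (sc.getD (k + d) ' '))
      && (List.range (n - k + 1)).all (fun d => !pvTMatch (sc.drop (k + d)) (pc.drop (k + 2))))

-- Pre_ excludes exactly the inputs on which Python A RETURNS the non-bool '' (the falsy empty string, which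
-- Python's `and` propagates from `match = s and …` when s is empty) instead of False — a value outside the
-- declared Bool return type; B returns False there.
def Pre_isMatch_v1 (s : String) (p : String) : Prop := pvRetEmpty s.toList p.toList = false
instance (s : String) (p : String) : Decidable (Pre_isMatch_v1 s p) := by unfold Pre_isMatch_v1; infer_instance

def pvWitness_isMatch_v1 : String × String := ("ab", ".b")

def Spec_isMatch_v1 (s : String) (p : String) (out : Bool) : Prop := out = isMatch_v1_alt s p
instance (s : String) (p : String) (out : Bool) : Decidable (Spec_isMatch_v1 s p out) := by unfold Spec_isMatch_v1; infer_instance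

-- ===== CLAIM (what is proved, stated in full; the proofs are below) =====
def Claim_equal_isMatch_v1 : Prop := ∀ (s : String) (p : String), Dom_isMatch_v1 s p → Pre_isMatch_v1 s p → Spec_isMatch_v1 s p (isMatch_v1 s p)

-- ===== LEMMAS AND PROOFS =====

theorem pvAMatch_star (s' rest : List Char) (c : Char) :
    pvAMatch s' (c :: '*' :: rest)
      = (pvAMatch s' rest ||
          (match s' with
           | [] => false
           | a :: s'' => (c == '.' || c == a) && pvAMatch s'' (c :: '*' :: rest))) := by
  rw [pvAMatch.eq_def]
  simp

theorem pvAMatch_nostar (s' rest : List Char) (c : Char) (h : rest.head? ≠ some '*') :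
    pvAMatch s' (c :: rest)
      = (match s' with
         | [] => false
         | a :: s'' => (c == '.' || c == a) && pvAMatch s'' rest) := by
  rw [pvAMatch.eq_def]
  simp [h]

def pvInv (sc pc : List Char) (memo : PySem.Dict (Nat × Nat) Bool) : Prop :=
  ∀ i j b, memo.get? (i, j) = some b → b = pvAMatch (sc.drop i) (pc.drop j)

theorem pvInv_insert {sc pc : List Char} {memo : PySem.Dict (Nat × Nat) Bool} {i j : Nat} {b : Bool}
    (h : pvInv sc pc memo) (hb : b = pvAMatch (sc.drop i) (pc.drop j)) :
    pvInv sc pc (memo.insert (i, j) b) := by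
  intro i' j' b' hb'
  rw [PySem.Dict.get?_insert] at hb'
  by_cases hij : (i', j') = (i, j)
  · rw [if_pos hij] at hb'
    cases hb'
    cases hij
    exact hb
  · rw [if_neg hij] at hb'
    exact h i' j' b' hb'

theorem pv_drop_cons {α : Type} (l : List α) (n : Nat) (h : n < l.length) (d : α) :
    l.drop n = l.getD n d :: l.drop (n + 1) := by
  rw [List.getD_eq_getElem l d h]
  exact List.drop_eq_getElem_cons h

theorem pv_drop_isEmpty (l : List Char) (i : Nat) (hi : i ≤ l.length) :
    (l.drop i).isEmpty = decide (i = l.length) := by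
  by_cases h : i = l.length
  · subst h
    simp
  · have hlt : i < l.length := by omega
    rw [pv_drop_cons l i hlt ' ']
    simp [h]

theorem pvGo_spec (sc pc : List Char) (fuel : Nat) : ∀ (i j : Nat) (memo : PySem.Dict (Nat × Nat) Bool),
    (sc.length - i) + (pc.length - j) < fuel → i ≤ sc.length → j ≤ pc.length → pvInv sc pc memo →
    pvInv sc pc (pvGo sc pc fuel memo i j).1 ∧
      (pvGo sc pc fuel memo i j).2 = pvAMatch (sc.drop i) (pc.drop j) := by
  induction fuel with
  | zero =>
    intro i j memo hn _ _ _
    exact absurd hn (Nat.not_lt_zero _)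
  | succ fuel ih =>
    intro i j memo hn hi hj hInv
    cases hm : memo.get? (i, j) with
    | some b =>
      have hstep : pvGo sc pc (fuel + 1) memo i j = (memo, b) := by
        rw [pvGo.eq_def]
        simp only [hm]
      rw [hstep]
      exact ⟨hInv, hInv _ _ b hm⟩
    | none =>
      by_cases hj' : j = pc.length
      · subst hj'
        have hval : pvAMatch (sc.drop i) (pc.drop pc.length) = decide (i = sc.length) := by
          rw [List.drop_length, pvAMatch.eq_def]
          simp [pv_drop_isEmpty sc i hi]
        have hstep : pvGo sc pc (fuel + 1) memo i pc.length
            = (memo.insert (i, pc.length) (decide (i = sc.length)), decide (i = sc.length)) := by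
          rw [pvGo.eq_def]
          simp [hm]
        rw [hstep]
        exact ⟨pvInv_insert hInv hval.symm, hval.symm⟩
      · have hjlt : j < pc.length := by omega
        have hdropj : pc.drop j = pc.getD j ' ' :: pc.drop (j + 1) := pv_drop_cons pc j hjlt ' '
        by_cases hst : j + 1 < pc.length ∧ pc.getD (j + 1) ' ' = '*'
        · -- star pair at position j
          have hdropj1 : pc.drop (j + 1) = '*' :: pc.drop (j + 2) := by
            rw [pv_drop_cons pc (j + 1) hst.1 ' ', hst.2]
          have hAM : pvAMatch (sc.drop i) (pc.drop j)
              = (pvAMatch (sc.drop i) (pc.drop (j + 2)) ||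
                  (match sc.drop i with
                   | [] => false
                   | a :: s'' => (pc.getD j ' ' == '.' || pc.getD j ' ' == a) && pvAMatch s'' (pc.drop j))) := by
            conv_lhs => rw [hdropj, hdropj1, pvAMatch_star]
            rw [hdropj, hdropj1]
          obtain ⟨I1, E1⟩ := ih i (j + 2) memo (by omega) hi (by omega) hInv
          cases hr1 : (pvGo sc pc fuel memo i (j + 2)).2 with
          | true =>
            have hval : pvAMatch (sc.drop i) (pc.drop j) = true := by
              rw [hAM, ← E1, hr1]
              simp
            have hstep : pvGo sc pc (fuel + 1) memo i j
                = ((pvGo sc pc fuel memo i (j + 2)).1.insert (i, j) true, true) := by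
              rw [pvGo.eq_def]
              simp only [hm, if_neg hj', if_pos hst, hr1, if_true]
            rw [hstep]
            exact ⟨pvInv_insert I1 hval.symm, hval.symm⟩
          | false =>
            by_cases hf : (decide (i < sc.length) && (pc.getD j ' ' == sc.getD i ' ' || pc.getD j ' ' == '.')) = true
            · have hf' := hf
              simp only [Bool.and_eq_true, decide_eq_true_eq, Bool.or_eq_true, beq_iff_eq] at hf'
              have hilt : i < sc.length := hf'.1
              have hdropi : sc.drop i = sc.getD i ' ' :: sc.drop (i + 1) := pv_drop_cons sc i hilt ' '
              obtain ⟨I2, E2⟩ := ih (i + 1) j (pvGo sc pc fuel memo i (j + 2)).1 (by omega) (by omega) (by omega) I1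
              have hor : (pc.getD j ' ' == '.' || pc.getD j ' ' == sc.getD i ' ') = true := by
                rcases hf'.2 with h | h <;> rw [h] <;> simp
              have hval : pvAMatch (sc.drop i) (pc.drop j)
                  = (pvGo sc pc fuel (pvGo sc pc fuel memo i (j + 2)).1 (i + 1) j).2 := by
                rw [hAM, ← E1, hr1, hdropi]
                simp only [Bool.false_or, hor, Bool.true_and]
                exact E2.symm
              have hstep : pvGo sc pc (fuel + 1) memo i j
                  = ((pvGo sc pc fuel (pvGo sc pc fuel memo i (j + 2)).1 (i + 1) j).1.insert (i, j)
                      (pvGo sc pc fuel (pvGo sc pc fuel memo i (j + 2)).1 (i + 1) j).2,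
                     (pvGo sc pc fuel (pvGo sc pc fuel memo i (j + 2)).1 (i + 1) j).2) := by
                rw [pvGo.eq_def]
                simp only [hm, if_neg hj', if_pos hst, hr1, Bool.false_eq_true, if_false, if_pos hf]
              rw [hstep]
              exact ⟨pvInv_insert I2 hval.symm, hval.symm⟩
            · have hval : pvAMatch (sc.drop i) (pc.drop j) = false := by
                rw [hAM, ← E1, hr1]
                simp only [Bool.false_or]
                by_cases hilt : i < sc.length
                · rw [pv_drop_cons sc i hilt ' ']
                  have hor : (pc.getD j ' ' == '.' || pc.getD j ' ' == sc.getD i ' ') = false := by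
                    have h2 : ¬ (pc.getD j ' ' == sc.getD i ' ' || pc.getD j ' ' == '.') = true := by
                      intro h
                      exact hf (by rw [h]; simp [hilt])
                    simp only [Bool.or_eq_true, not_or, Bool.not_eq_true] at h2
                    rw [h2.1, h2.2]
                    rfl
                  simp only [hor, Bool.false_and]
                · rw [List.drop_eq_nil_of_le (by omega)]
              have hstep : pvGo sc pc (fuel + 1) memo i j
                  = ((pvGo sc pc fuel memo i (j + 2)).1.insert (i, j) false, false) := by
                rw [pvGo.eq_def]
                simp only [hm, if_neg hj', if_pos hst, hr1, Bool.false_eq_true, if_false, if_neg hf]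
              rw [hstep]
              exact ⟨pvInv_insert I1 hval.symm, hval.symm⟩
        · -- no star after position j
          have hhd : (pc.drop (j + 1)).head? ≠ some '*' := by
            by_cases hlen : j + 1 < pc.length
            · rw [pv_drop_cons pc (j + 1) hlen ' ']
              simp only [List.head?_cons, ne_eq, Option.some.injEq]
              intro hc
              exact hst ⟨hlen, hc⟩
            · rw [List.drop_eq_nil_of_le (by omega)]
              simp
          have hAM : pvAMatch (sc.drop i) (pc.drop j)
              = (match sc.drop i with
                 | [] => false
                 | a :: s'' => (pc.getD j ' ' == '.' || pc.getD j ' ' == a) && pvAMatch s'' (pc.drop (j + 1))) := by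
            conv_lhs => rw [hdropj, pvAMatch_nostar _ _ _ hhd]
          by_cases hf : (decide (i < sc.length) && (pc.getD j ' ' == sc.getD i ' ' || pc.getD j ' ' == '.')) = true
          · have hf' := hf
            simp only [Bool.and_eq_true, decide_eq_true_eq, Bool.or_eq_true, beq_iff_eq] at hf'
            have hilt : i < sc.length := hf'.1
            have hdropi : sc.drop i = sc.getD i ' ' :: sc.drop (i + 1) := pv_drop_cons sc i hilt ' '
            obtain ⟨I2, E2⟩ := ih (i + 1) (j + 1) memo (by omega) (by omega) (by omega) hInv
            have hor : (pc.getD j ' ' == '.' || pc.getD j ' ' == sc.getD i ' ') = true := by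
              rcases hf'.2 with h | h <;> rw [h] <;> simp
            have hval : pvAMatch (sc.drop i) (pc.drop j) = (pvGo sc pc fuel memo (i + 1) (j + 1)).2 := by
              rw [hAM, hdropi]
              simp only [hor, Bool.true_and]
              exact E2.symm
            have hstep : pvGo sc pc (fuel + 1) memo i j
                = ((pvGo sc pc fuel memo (i + 1) (j + 1)).1.insert (i, j) (pvGo sc pc fuel memo (i + 1) (j + 1)).2,
                   (pvGo sc pc fuel memo (i + 1) (j + 1)).2) := by
              rw [pvGo.eq_def]
              simp only [hm, if_neg hj', if_neg hst, if_pos hf]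
            rw [hstep]
            exact ⟨pvInv_insert I2 hval.symm, hval.symm⟩
          · have hval : pvAMatch (sc.drop i) (pc.drop j) = false := by
              rw [hAM]
              by_cases hilt : i < sc.length
              · rw [pv_drop_cons sc i hilt ' ']
                have hor : (pc.getD j ' ' == '.' || pc.getD j ' ' == sc.getD i ' ') = false := by
                  have h2 : ¬ (pc.getD j ' ' == sc.getD i ' ' || pc.getD j ' ' == '.') = true := by
                    intro h
                    exact hf (by rw [h]; simp [hilt])
                  simp only [Bool.or_eq_true, not_or, Bool.not_eq_true] at h2
                  rw [h2.1, h2.2]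
                  rfl
                simp only [hor, Bool.false_and]
              · rw [List.drop_eq_nil_of_le (by omega)]
            have hstep : pvGo sc pc (fuel + 1) memo i j = (memo.insert (i, j) false, false) := by
              rw [pvGo.eq_def]
              simp only [hm, if_neg hj', if_neg hst, if_neg hf]
            rw [hstep]
            exact ⟨pvInv_insert hInv hval.symm, hval.symm⟩

-- ===== VERDICT (by name: the statement is the Claim_ definition above) =====
theorem isMatch_v1_spec : Claim_equal_isMatch_v1 := by
  intro s p _ _
  unfold Spec_isMatch_v1 isMatch_v1 isMatch_v1_alt
  have h := pvGo_spec s.toList p.toList (s.toList.length + p.toList.length + 1) 0 0 PySem.Dict.empty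
    (by omega) (Nat.zero_le _) (Nat.zero_le _)
    (by intro i j b hb; simp [PySem.Dict.get?_empty] at hb)
  simpa using h.2.symm
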